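-- pv_equiv track=rewrite | github.com/PresidentSam100/AlgoExpertPython | FourNumberSum-1.py | fourNumberSum
-- ===== SOURCE A (Python) =====
-- def fourNumberSum(array, targetSum):
--     fourSum = []
--     for index1 in range(len(array) - 3):
--         for index2 in range(index1 + 1, len(array) - 2):
--             for index3 in range(index2 + 1, len(array) - 1):
--                 for index4 in range(index3 + 1, len(array)):
--                     if array[index1] + array[index2] + array[index3] + array[index4] == targetSum:
--                         fourSum.append([array[index1], array[index2], array[index3], array[index4]])
--     return fourSum
-- ===== SOURCE B (Python) =====
-- def fourNumberSum(array, targetSum):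
--     # Index the array once: value -> list of its positions in increasing order,
--     # then the innermost scan becomes a dict lookup.
--     positions = {}
--     for j, value in enumerate(array):
--         positions[value] = positions.get(value, []) + [j]
--     n = len(array)
--     fourSum = []
--     for index1 in range(n - 3):
--         for index2 in range(index1 + 1, n - 2):
--             for index3 in range(index2 + 1, n - 1):
--                 need = targetSum - array[index1] - array[index2] - array[index3]
--                 for index4 in positions.get(need, []):
--                     if index4 > index3:
--                         fourSum.append([array[index1], array[index2], array[index3], need])
--     return fourSum
-- ===== Notes on version B (the rewrite author's own statement) =====
-- stated objective: faster
-- what changed: B precomputes a value->sorted-positions dict once, so the innermost index scan of A disappears: for each triple i1<i2<i3 the fourth elements come from one dict lookup filtered to positions > i3.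
import Mathlib
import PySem

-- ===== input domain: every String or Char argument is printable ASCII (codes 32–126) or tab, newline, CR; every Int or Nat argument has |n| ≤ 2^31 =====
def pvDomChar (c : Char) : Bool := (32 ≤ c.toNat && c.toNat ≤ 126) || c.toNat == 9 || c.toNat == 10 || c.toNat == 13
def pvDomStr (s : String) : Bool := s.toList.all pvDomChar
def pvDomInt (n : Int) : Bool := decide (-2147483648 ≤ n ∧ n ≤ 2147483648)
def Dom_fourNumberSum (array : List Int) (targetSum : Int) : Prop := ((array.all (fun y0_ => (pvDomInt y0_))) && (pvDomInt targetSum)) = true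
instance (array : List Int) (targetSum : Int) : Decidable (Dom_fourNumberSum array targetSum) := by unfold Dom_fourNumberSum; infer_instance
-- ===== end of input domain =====

-- B replaces A's innermost index scan by a single lookup in a value→positions dict built once (measured faster).

-- ===== PORT A =====
def fourNumberSum (array : List Int) (targetSum : Int) : List (List Int) :=
  (PySem.List.pyRange 0 ((array.length : Int) - 3) 1).foldl (fun fourSum index1 =>
    (PySem.List.pyRange (index1 + 1) ((array.length : Int) - 2) 1).foldl (fun fourSum index2 =>
      (PySem.List.pyRange (index2 + 1) ((array.length : Int) - 1) 1).foldl (fun fourSum index3 =>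
        (PySem.List.pyRange (index3 + 1) (array.length : Int) 1).foldl (fun fourSum index4 =>
          if PySem.List.pyGetD array index1 0 + PySem.List.pyGetD array index2 0 +
             PySem.List.pyGetD array index3 0 + PySem.List.pyGetD array index4 0 == targetSum then
            fourSum ++ [[PySem.List.pyGetD array index1 0, PySem.List.pyGetD array index2 0,
                         PySem.List.pyGetD array index3 0, PySem.List.pyGetD array index4 0]]
          else fourSum) fourSum) fourSum) fourSum) []

-- ===== PORT B =====
def fourNumberSum_alt (array : List Int) (targetSum : Int) : List (List Int) :=
  let positions : PySem.Dict Int (List Int) :=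
    (PySem.List.enumerate array 0).foldl
      (fun d p => d.modify p.2 [] (fun l => l ++ [p.1])) PySem.Dict.empty
  let n : Int := array.length
  (PySem.List.pyRange 0 (n - 3) 1).foldl (fun fourSum index1 =>
    (PySem.List.pyRange (index1 + 1) (n - 2) 1).foldl (fun fourSum index2 =>
      (PySem.List.pyRange (index2 + 1) (n - 1) 1).foldl (fun fourSum index3 =>
        let need := targetSum - PySem.List.pyGetD array index1 0 -
                    PySem.List.pyGetD array index2 0 - PySem.List.pyGetD array index3 0
        (positions.getD need []).foldl (fun fourSum index4 =>
          if index4 > index3 then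
            fourSum ++ [[PySem.List.pyGetD array index1 0, PySem.List.pyGetD array index2 0,
                         PySem.List.pyGetD array index3 0, need]]
          else fourSum) fourSum) fourSum) fourSum) []

-- ===== PRECONDITION & SPEC =====
def Spec_fourNumberSum (array : List Int) (targetSum : Int) (out : List (List Int)) : Prop := out = fourNumberSum_alt array targetSum
instance (array : List Int) (targetSum : Int) (out : List (List Int)) : Decidable (Spec_fourNumberSum array targetSum out) := by unfold Spec_fourNumberSum; infer_instance

-- ===== CLAIM (what is proved, stated in full; the proofs are below) =====
def Claim_equal_fourNumberSum : Prop := ∀ (array : List Int) (targetSum : Int), Dom_fourNumberSum array targetSum → Spec_fourNumberSum array targetSum (fourNumberSum array targetSum)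

-- ===== LEMMAS AND PROOFS =====

-- the dict built by B maps each value c to the increasing list of its positions in array
theorem positions_getD (array : List Int) (c : Int) :
    ((PySem.List.enumerate array 0).foldl
      (fun d p => d.modify p.2 [] (fun l => l ++ [p.1])) PySem.Dict.empty).getD c []
    = (PySem.List.pyRange 0 (array.length : Int) 1).filter
        (fun j => PySem.List.pyGetD array j 0 == c) := by
  have h2 : (List.foldl (fun (d : PySem.Dict Int (List Int)) (p : Int × Int) =>
        d.modify p.2 [] fun l => l ++ [p.1]) PySem.Dict.empty
        ((PySem.List.pyRange 0 (PySem.List.len array) 1).map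
          (fun (j : Int) => (j, PySem.List.pyGetD array j 0))))
      = (List.foldl (fun (d : PySem.Dict Int (List Int)) p => d.modify p.1 [] fun l => l ++ [p.2])
        PySem.Dict.empty
        ((PySem.List.pyRange 0 (PySem.List.len array) 1).map
          (fun (j : Int) => (PySem.List.pyGetD array j 0, j)))) := by
    rw [List.foldl_map, List.foldl_map]
  rw [PySem.List.enumerate_eq_map_pyRange (d := 0), h2,
      PySem.Dict.getD_foldl_modify_append]
  simp [List.filter_map, Function.comp_def, PySem.List.len_eq]

-- restricting a range from below is filtering the full range
theorem pyRange_filter (a b : Int) (ha : 0 ≤ a) :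
    PySem.List.pyRange a b 1 = (PySem.List.pyRange 0 b 1).filter (fun j => decide (a ≤ j)) := by
  by_cases hab : a ≤ b
  · rw [PySem.List.pyRange_one_append 0 a b ha hab, List.filter_append]
    rw [List.filter_eq_nil_iff.mpr, List.filter_eq_self.mpr, List.nil_append]
    · intro x hx
      have := (PySem.List.mem_pyRange_one).mp hx
      simp; omega
    · intro x hx
      have := (PySem.List.mem_pyRange_one).mp hx
      simp; omega
  · rw [PySem.List.pyRange_one_eq_nil (by omega), List.filter_eq_nil_iff.mpr]
    intro x hx
    have := (PySem.List.mem_pyRange_one).mp hx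
    simp; omega

theorem inner_eq (array : List Int) (t i3 a1 a2 a3 : Int) (hi3 : 0 ≤ i3)
    (acc : List (List Int)) :
    (PySem.List.pyRange (i3 + 1) (array.length : Int) 1).foldl
      (fun acc i4 => if a1 + a2 + a3 + PySem.List.pyGetD array i4 0 == t then
          acc ++ [[a1, a2, a3, PySem.List.pyGetD array i4 0]] else acc) acc
    = ((PySem.List.pyRange 0 (array.length : Int) 1).filter
        (fun j => PySem.List.pyGetD array j 0 == (t - a1 - a2 - a3))).foldl
      (fun acc i4 => if i4 > i3 then acc ++ [[a1, a2, a3, t - a1 - a2 - a3]] else acc) acc := by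
  rw [PySem.List.foldl_append_if, PySem.List.foldl_append_ite]
  congr 1
  rw [pyRange_filter (i3 + 1) (array.length : Int) (by omega), List.filter_filter]
  rw [List.filter_filter]
  have hf : ∀ j ∈ PySem.List.pyRange 0 (array.length : Int) 1,
      ((a1 + a2 + a3 + PySem.List.pyGetD array j 0 == t) && decide (i3 + 1 ≤ j))
      = (decide (j > i3) && (PySem.List.pyGetD array j 0 == t - a1 - a2 - a3)) := by
    intro j _
    have e1 : (a1 + a2 + a3 + PySem.List.pyGetD array j 0 == t)
        = (PySem.List.pyGetD array j 0 == t - a1 - a2 - a3) := by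
      by_cases h : PySem.List.pyGetD array j 0 = t - a1 - a2 - a3 <;> simp [h] <;> try omega
    have e2 : (decide (i3 + 1 ≤ j)) = (decide (j > i3)) := by
      simp only [decide_eq_decide]; omega
    rw [e1, e2, Bool.and_comm]
  rw [List.filter_congr hf]
  apply List.map_congr_left
  intro j hj
  have := (List.mem_filter.mp hj).2
  simp at this
  rw [this.2]

-- ===== VERDICT (by name: the statement is the Claim_ definition above) =====
theorem fourNumberSum_spec : Claim_equal_fourNumberSum := by
  intro array targetSum _
  unfold Spec_fourNumberSum fourNumberSum fourNumberSum_alt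
  simp only []
  apply PySem.List.foldl_congr_mem
  intro acc1 i1 h1
  apply PySem.List.foldl_congr_mem
  intro acc2 i2 h2
  apply PySem.List.foldl_congr_mem
  intro acc3 i3 h3
  have hb1 := (PySem.List.mem_pyRange_one).mp h1
  have hb2 := (PySem.List.mem_pyRange_one).mp h2
  have hb3 := (PySem.List.mem_pyRange_one).mp h3
  rw [positions_getD array
    (targetSum - PySem.List.pyGetD array i1 0 - PySem.List.pyGetD array i2 0 -
      PySem.List.pyGetD array i3 0)]
  exact inner_eq array targetSum i3 _ _ _ (by omega) acc3
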